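-- pv_equiv track=rewrite | github.com/MolfarUA/CodeWars_Solutions | 3 kyu/Alphabetic Anagrams/solution.py | listPosition
-- ===== SOURCE A (Python) =====
-- from collections import Counter
-- from collections import Counter
-- from collections import Counter
--
-- def listPosition(word):
--     l, r, s = len(word), 1, 1
--     c = Counter()
--
--     for i in range(l):
--         x = word[(l - 1) - i]
--         c[x] += 1
--         for y in c:
--             if (y < x):
--                 r += s * c[y] // c[x]
--         s = s * (i + 1) // c[x]
--     return r
-- ===== SOURCE B (Python) =====
-- def _fact(n):
--     r = 1
--     for k in range(2, n + 1):
--         r *= k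
--     return r
--
--
-- def listPosition(word):
--     n = len(word)
--     counts = {}
--     for ch in word:
--         counts[ch] = counts.get(ch, 0) + 1
--     denom = 1                  # product of factorials of the remaining multiplicities
--     for v in counts.values():
--         denom *= _fact(v)
--     f = _fact(n - 1)           # factorial of the number of letters after the current one
--     rank = 1
--     for i in range(n):
--         x = word[i]
--         # permutations of the remaining letters that start with a letter smaller than x
--         smaller = sum(v for y, v in counts.items() if y < x)
--         rank += smaller * f // denom
--         denom //= counts[x]    # exact: remove one x from the pool
--         counts[x] -= 1
--         if i < n - 1:
--             f //= n - 1 - i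
--     return rank
-- ===== Notes on version B (the rewrite author's own statement) =====
-- stated objective: alternative
-- what changed: A scans the word right-to-left, growing a Counter and incrementally maintaining the permutation count of the suffix seen so far; B precomputes the full letter-count dict, the multinomial denominator and (n-1)!, then scans left-to-right adding smaller*(n-1-i)!//denominator at each position and shrinking the pool.
import Mathlib
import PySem

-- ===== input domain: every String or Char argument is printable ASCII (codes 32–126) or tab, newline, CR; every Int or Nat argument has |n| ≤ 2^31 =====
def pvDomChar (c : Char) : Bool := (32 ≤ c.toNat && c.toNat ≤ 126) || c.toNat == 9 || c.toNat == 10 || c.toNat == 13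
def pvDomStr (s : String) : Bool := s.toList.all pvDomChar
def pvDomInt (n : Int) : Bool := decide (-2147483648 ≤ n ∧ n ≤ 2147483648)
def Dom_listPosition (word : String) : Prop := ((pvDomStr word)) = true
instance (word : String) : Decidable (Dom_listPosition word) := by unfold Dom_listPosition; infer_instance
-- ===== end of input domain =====

-- B replaces A's right-to-left loop (incrementally updated permutation count + running Counter)
-- by a left-to-right loop over a precomputed letter-count dict, using the closed multinomial
-- formula smaller * (n-1-i)! // prod(count!) per position (objective: alternative).

-- ===== PORT A =====
-- the body of A's 'for i in range(l)' loop over the state (r, s, c)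
def pvStepA (l : Int) (cs : List Char) (st : Int × Int × PySem.Dict Char Int) (i : Int) :
    Int × Int × PySem.Dict Char Int :=
  let r := st.1
  let s := st.2.1
  let c := st.2.2
  -- x = word[(l - 1) - i]; the index is always in range here, so Python never raises
  let x := (PySem.List.pyGet? cs ((l - 1) - i)).getD ' '
  let c := c.modify x 0 (· + 1)                           -- c[x] += 1  (Counter semantics)
  let r := c.keys.foldl (fun r y =>                        -- for y in c: if y < x: r += s * c[y] // c[x]
      if y < x then r + PySem.Int.floordiv (s * c.getD y 0) (c.getD x 0) else r) r
  let s := PySem.Int.floordiv (s * (i + 1)) (c.getD x 0)   -- s = s * (i + 1) // c[x]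
  (r, s, c)

def listPosition (word : String) : Int :=
  let l : Int := PySem.Str.len word
  ((PySem.List.pyRange 0 l).foldl (pvStepA l word.toList) (1, 1, PySem.Dict.empty)).1

-- ===== PORT B =====
-- _fact(n): r = 1; for k in range(2, n + 1): r *= k
def pvFact (n : Int) : Int := (PySem.List.pyRange 2 (n + 1)).foldl (· * ·) 1

-- the body of B's 'for i in range(n)' loop over the state (rank, denom, f, counts)
def pvStepB (n : Int) (cs : List Char) (st : Int × Int × Int × PySem.Dict Char Int) (i : Int) :
    Int × Int × Int × PySem.Dict Char Int :=
  let rank := st.1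
  let denom := st.2.1
  let f := st.2.2.1
  let counts := st.2.2.2
  -- x = word[i]; the index is always in range here, so Python never raises
  let x := (PySem.List.pyGet? cs i).getD ' '
  let smaller := counts.items.foldl (fun a p => if p.1 < x then a + p.2 else a) 0
  let rank := rank + PySem.Int.floordiv (smaller * f) denom
  let denom := PySem.Int.floordiv denom (counts.getD x 0)   -- denom //= counts[x]
  let counts := counts.insert x (counts.getD x 0 - 1)       -- counts[x] -= 1
  let f := if i < n - 1 then PySem.Int.floordiv f (n - 1 - i) else f
  (rank, denom, f, counts)

def listPosition_alt (word : String) : Int :=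
  let cs := word.toList
  let n : Int := PySem.Str.len word
  let counts := cs.foldl (fun d ch => d.insert ch (d.getD ch 0 + 1)) PySem.Dict.empty
  let denom := counts.values.foldl (fun d v => d * pvFact v) 1
  let f := pvFact (n - 1)
  ((PySem.List.pyRange 0 n).foldl (pvStepB n cs) (1, denom, f, counts)).1

-- ===== PRECONDITION & SPEC =====
def Spec_listPosition (word : String) (out : Int) : Prop := out = listPosition_alt word
instance (word : String) (out : Int) : Decidable (Spec_listPosition word out) := by unfold Spec_listPosition; infer_instance

-- ===== CLAIM (what is proved, stated in full; the proofs are below) =====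
def Claim_equal_listPosition : Prop := ∀ (word : String), Dom_listPosition word → Spec_listPosition word (listPosition word)

-- ===== LEMMAS AND PROOFS =====

-- Nat-level product of the factorials of the letter multiplicities
def denN : List Char → ℕ
  | [] => 1
  | x :: t => (t.count x + 1) * denN t

-- reference value: number of strictly smaller anagrams of u (suffix recursion)
def pvRank : List Char → Int
  | [] => 0
  | x :: t =>
    (((x :: t).countP (fun ch => decide (ch < x)) * t.length.factorial / denN (x :: t) : ℕ) : Int) +
      pvRank t

lemma denN_pos (u : List Char) : 0 < denN u := by
  induction u with
  | nil => simp [denN]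
  | cons x t ih => exact Nat.mul_pos (Nat.succ_pos _) ih

lemma pvFact_eq (n : ℕ) : pvFact (n : Int) = (n.factorial : Int) := by
  induction n with
  | zero => decide
  | succ m ih =>
    cases m with
    | zero => decide
    | succ p =>
      have h2 : (2 : Int) ≤ ((p + 1 : ℕ) : Int) + 1 := by push_cast; omega
      unfold pvFact
      push_cast
      rw [show ((p:Int) + 1 + 1 + 1) = (((p:Int)+1+1) + 1) by ring,
        PySem.List.pyRange_one_succ_right (by push_cast at h2 ⊢; omega), List.foldl_append]
      have ih' : (PySem.List.pyRange 2 ((p:Int) + 1 + 1)).foldl (· * ·) 1 = ((p+1).factorial : Int) := by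
        have := ih; unfold pvFact at this; push_cast at this; convert this using 3 <;> push_cast <;> ring
      rw [ih']
      simp [Nat.factorial_succ]
      push_cast; ring

lemma denN_eq_prod (u : List Char) : denN u = ∏ c ∈ u.toFinset, (u.count c).factorial := by
  induction u with
  | nil => simp [denN]
  | cons x t ih =>
    by_cases hx : x ∈ t
    · rw [List.toFinset_cons, Finset.insert_eq_self.mpr (List.mem_toFinset.mpr hx)]
      rw [← Finset.mul_prod_erase _ _ (List.mem_toFinset.mpr hx)]
      rw [List.count_cons_self]
      have hrest : ∏ c ∈ t.toFinset.erase x, ((x :: t).count c).factorial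
          = ∏ c ∈ t.toFinset.erase x, (t.count c).factorial := by
        refine Finset.prod_congr rfl fun c hc => ?_
        have hne : ¬ (x = c) := fun h => Finset.ne_of_mem_erase hc h.symm
        simp [List.count_cons, hne]
      rw [hrest, denN, ih, ← Finset.mul_prod_erase _ _ (List.mem_toFinset.mpr hx)]
      rw [Nat.factorial_succ]
      ring
    · rw [List.toFinset_cons, Finset.prod_insert (by simpa using hx)]
      rw [List.count_cons_self, List.count_eq_zero_of_not_mem hx]
      have hrest : ∏ c ∈ t.toFinset, ((x :: t).count c).factorial
          = ∏ c ∈ t.toFinset, (t.count c).factorial := by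
        refine Finset.prod_congr rfl fun c hc => ?_
        have hne : ¬ (x = c) := by rintro rfl; exact hx (List.mem_toFinset.mp hc)
        simp [List.count_cons, hne]
      rw [hrest, denN, ih]
      simp [List.count_eq_zero_of_not_mem hx, Nat.factorial]

lemma denN_dvd_factorial (u : List Char) : denN u ∣ u.length.factorial := by
  rw [denN_eq_prod]
  have := Nat.prod_factorial_dvd_factorial_sum u.toFinset u.count
  rwa [show ∑ c ∈ u.toFinset, u.count c = u.length from ?_] at this
  simpa using (Multiset.toFinset_sum_count_eq (u : Multiset Char))

lemma denN_erase (u : List Char) {y : Char} (hy : y ∈ u) :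
    denN u = u.count y * denN (u.erase y) := by
  induction u with
  | nil => cases hy
  | cons x t ih =>
    by_cases hxy : y = x
    · subst hxy
      rw [List.erase_cons_head, denN, List.count_cons_self]
    · rw [List.erase_cons_tail (by simpa using fun h => hxy h.symm)]
      have hyt : y ∈ t := by
        rcases List.mem_cons.mp hy with h | h
        · exact absurd h hxy
        · exact h
      have h1 : (t.erase y).count x = t.count x := List.count_erase_of_ne (fun h => hxy h.symm)
      have h2 : (x :: t).count y = t.count y := by
        have hne : ¬ (x = y) := fun h => hxy h.symm
        simp [List.count_cons, hne]
      rw [denN, denN, h1, h2, ih hyt]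
      ring

lemma denN_dvd_count_mul (u : List Char) {y : Char} (hy : y ∈ u) :
    denN u ∣ u.count y * (u.length - 1).factorial := by
  rw [denN_erase u hy]
  have h := denN_dvd_factorial (u.erase y)
  rw [List.length_erase_of_mem hy] at h
  exact Nat.mul_dvd_mul_left _ h

lemma sum_count_filter (u : List Char) (p : Char → Bool) :
    ∑ y ∈ u.toFinset.filter (fun y => p y = true), u.count y = u.countP p := by
  classical
  have h1 : ∑ y ∈ u.toFinset.filter (fun y => p y = true), u.count y
      = ∑ y ∈ u.toFinset, (u.filter p).count y := by
    rw [Finset.sum_filter]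
    refine Finset.sum_congr rfl fun y _ => ?_
    by_cases hp : p y = true
    · simp [hp, List.count_filter hp]
    · simp [hp, List.count_eq_zero_of_not_mem (fun hm => hp (List.of_mem_filter hm))]
  rw [h1]
  have h2 : ∑ y ∈ u.toFinset, (u.filter p).count y
      = ∑ y ∈ (u.filter p).toFinset, (u.filter p).count y := by
    symm
    refine Finset.sum_subset (fun y hy => List.mem_toFinset.mpr (List.mem_of_mem_filter (List.mem_toFinset.mp hy))) ?_
    intro y _ hy
    exact List.count_eq_zero_of_not_mem (fun hm => hy (List.mem_toFinset.mpr hm))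
  rw [h2]
  have h3 := Multiset.toFinset_sum_count_eq ((u.filter p : List Char) : Multiset Char)
  simpa [List.countP_eq_length_filter] using h3

lemma sum_div_of_dvd (F : Finset Char) (d : ℕ) (hd : 0 < d) (f : Char → ℕ)
    (h : ∀ y ∈ F, d ∣ f y) : ∑ y ∈ F, f y / d = (∑ y ∈ F, f y) / d := by
  symm
  apply Nat.div_eq_of_eq_mul_left hd
  rw [Finset.sum_mul]
  exact Finset.sum_congr rfl fun y hy => (Nat.div_mul_cancel (h y hy)).symm

lemma invA (cs : List Char) (k : ℕ) (hk : k ≤ cs.length) :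
    (List.range k).foldl (fun st (j : ℕ) => pvStepA (cs.length : Int) cs st (j : Int))
        (1, 1, PySem.Dict.empty) =
      (1 + pvRank ((cs.reverse.take k).reverse),
       ((k.factorial / denN ((cs.reverse.take k).reverse) : ℕ) : Int),
       PySem.Dict.counter (cs.reverse.take k)) := by
  induction k with
  | zero => simp [pvRank, denN]; rfl
  | succ k ih =>
    have hk' : k < cs.length := hk
    rw [List.range_succ, List.foldl_append, ih (le_of_lt hk'), List.foldl_cons, List.foldl_nil]
    -- names
    have hkr : k < cs.reverse.length := by simpa using hk'
    set x := cs.reverse[k]'hkr with hxdef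
    set v := cs.reverse.take k with hvdef
    set w := v.reverse with hwdef
    have hvx : cs.reverse.take (k + 1) = v ++ [x] := by
      rw [List.take_succ, hvdef, List.getElem?_eq_getElem hkr]
      rfl
    have hwlen : w.length = k := by
      simp [hwdef, hvdef, List.length_take, Nat.min_eq_left (le_of_lt (by simpa using hk'))]
    -- the x computed by the step
    have hx : (PySem.List.pyGet? cs (((cs.length : ℕ) : Int) - 1 - (k : Int))).getD ' ' = x := by
      have hcast : ((cs.length : ℕ) : Int) - 1 - (k : Int) = ((cs.length - 1 - k : ℕ) : Int) := by
        push_cast; omega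
      rw [hcast, PySem.List.pyGet?_natCast, List.getElem?_eq_getElem (by omega)]
      simp [hxdef, List.getElem_reverse]
    simp only [pvStepA, hx, hvx]
    rw [← PySem.Dict.counter_append_singleton]
    have hrev : (v ++ [x]).reverse = x :: w := by simp [hwdef]
    rw [hrev]
    have hqdvd : denN w ∣ k.factorial := by
      have := denN_dvd_factorial w; rwa [hwlen] at this
    have hq : k.factorial / denN w * denN w = k.factorial := Nat.div_mul_cancel hqdvd
    have hcnt : ∀ y, (PySem.Dict.counter (v ++ [x])).getD y 0 = (((x :: w).count y : ℕ) : Int) := by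
      intro y
      rw [PySem.Dict.getD_counter]
      norm_cast
      simp [hwdef, List.count_append, List.count_cons, List.count_reverse]
    refine Prod.ext ?_ (Prod.ext ?_ rfl)
    · -- r component
      simp only
      rw [PySem.List.foldl_ite_eq_foldl_filter (p := fun y => y < x),
        PySem.Dict.keys_counter,
        PySem.List.foldl_add (g := fun y => PySem.Int.floordiv
          ((((k.factorial / denN w : ℕ)) : Int) * (PySem.Dict.counter (v ++ [x])).getD y 0)
          ((PySem.Dict.counter (v ++ [x])).getD x 0))]
      have hcx : (x :: w).count x = w.count x + 1 := by simp
      have hden : denN (x :: w) = (w.count x + 1) * denN w := rfl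
      have hlen : (x :: w).length = k + 1 := by simp [hwlen]
      set K := (PySem.Set.ofList (v ++ [x])).filter (fun y => decide (y < x)) with hKdef
      have hKnodup : K.Nodup := (PySem.Set.nodup_ofList _).filter _
      have hmemK : ∀ y, y ∈ K ↔ y ∈ (x :: w) ∧ y < x := by
        intro y
        constructor
        · intro hy
          have h1 := List.of_mem_filter hy
          have h2 := List.mem_of_mem_filter hy
          rw [PySem.Set.mem_ofList] at h2
          have hlt : y < x := by simpa using h1
          refine ⟨?_, hlt⟩
          rcases List.mem_append.mp h2 with h | h
          · exact List.mem_cons_of_mem _ (by simpa [hwdef] using h)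
          · simp at h; subst h; exact List.mem_cons_self
        · rintro ⟨hy, hlt⟩
          refine List.mem_filter.mpr ⟨?_, by simpa using hlt⟩
          rw [PySem.Set.mem_ofList]
          rcases List.mem_cons.mp hy with h | h
          · subst h; exact List.mem_append.mpr (Or.inr (by simp))
          · exact List.mem_append.mpr (Or.inl (by simpa [hwdef] using h))
      have hmap : K.map (fun y => PySem.Int.floordiv
            ((((k.factorial / denN w : ℕ)) : Int) * (PySem.Dict.counter (v ++ [x])).getD y 0)
            ((PySem.Dict.counter (v ++ [x])).getD x 0))
          = K.map (fun y => ((k.factorial * (x :: w).count y / denN (x :: w) : ℕ) : Int)) := by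
        refine List.map_congr_left fun y hy => ?_
        rw [hcnt y, hcnt x, show (((k.factorial / denN w : ℕ)) : Int) * (((x :: w).count y : ℕ) : Int)
            = (((k.factorial / denN w * ((x :: w).count y) : ℕ)) : Int) by push_cast; ring,
          PySem.Int.floordiv_natCast]
        norm_cast
        have hden' : denN (x :: w) = denN w * (x :: w).count x := by
          rw [hcx]; simp [denN]; ring
        rw [hden',
          show k.factorial * (x :: w).count y = (k.factorial / denN w * (x :: w).count y) * denN w by
            rw [mul_right_comm, hq],
          ← Nat.div_div_eq_div_mul, Nat.mul_div_cancel _ (denN_pos w)]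
      rw [hmap]
      have hsum : (K.map (fun y => ((k.factorial * (x :: w).count y / denN (x :: w) : ℕ) : Int))).sum
          = (((x :: w).countP (fun ch => decide (ch < x)) * k.factorial / denN (x :: w) : ℕ) : Int) := by
        rw [← List.sum_toFinset _ hKnodup, ← Nat.cast_sum]
        congr 1
        have hKfin : K.toFinset = (x :: w).toFinset.filter (fun y => decide (y < x) = true) := by
          ext y
          simp only [List.mem_toFinset, Finset.mem_filter, hmemK, decide_eq_true_eq]
        rw [hKfin]
        rw [sum_div_of_dvd _ (denN (x :: w)) (denN_pos _) _
            (fun y hy => by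
              have hyu : y ∈ (x :: w) := List.mem_toFinset.mp (Finset.mem_of_mem_filter _ hy)
              have := denN_dvd_count_mul (x :: w) hyu
              rw [hlen, Nat.add_sub_cancel] at this
              rwa [mul_comm] at this),
          ← Finset.mul_sum, sum_count_filter (x :: w) (fun ch => decide (ch < x)), mul_comm]
      rw [hsum,
        show pvRank (x :: w) = (((x :: w).countP (fun ch => decide (ch < x)) * w.length.factorial
            / denN (x :: w) : ℕ) : Int) + pvRank w from rfl, hwlen]
      ring
    · -- s component
      show PySem.Int.floordiv ((((k.factorial / denN w : ℕ) : Int)) * ((k : Int) + 1))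
          ((PySem.Dict.counter (v ++ [x])).getD x 0) = (((k+1).factorial / denN (x :: w) : ℕ) : Int)
      rw [hcnt x]
      have hc1 : ((k : Int) + 1) = (((k + 1 : ℕ)) : Int) := by push_cast; ring
      rw [hc1, show (((k.factorial / denN w : ℕ) : Int)) * (((k + 1 : ℕ)) : Int)
          = (((k.factorial / denN w * (k+1) : ℕ)) : Int) by push_cast; ring,
        PySem.Int.floordiv_natCast]
      norm_cast
      have hcx : (x :: w).count x = w.count x + 1 := by simp [List.count_cons]
      have hden : denN (x :: w) = (w.count x + 1) * denN w := rfl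
      rw [hcx, hden]
      have h1 : (k+1).factorial = (k.factorial / denN w * (k+1)) * denN w := by
        rw [mul_right_comm, hq, Nat.factorial_succ, mul_comm]
      rw [h1, mul_comm (w.count x + 1) (denN w), ← Nat.div_div_eq_div_mul,
        Nat.mul_div_cancel _ (denN_pos w)]

def dictD (cs : List Char) (k : ℕ) : PySem.Dict Char Int :=
  PySem.Dict.mk ((PySem.Set.ofList cs).map (fun c => (c, ((cs.drop k).count c : Int))))

lemma keys_dictD (cs : List Char) (k : ℕ) : (dictD cs k).keys = PySem.Set.ofList cs := by
  simp only [dictD, PySem.Dict.keys]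
  have : ((fun x : Char × Int => x.1) ∘ fun c : Char => (c, ((cs.drop k).count c : Int))) = id := rfl
  simp [this]

lemma nodup_keys_dictD (cs : List Char) (k : ℕ) : (dictD cs k).keys.Nodup := by
  rw [keys_dictD]; exact PySem.Set.nodup_ofList cs

lemma getD_dictD (cs : List Char) (k : ℕ) (y : Char) :
    (dictD cs k).getD y 0 = (((cs.drop k).count y : ℕ) : Int) := by
  by_cases hy : y ∈ cs
  · have hm : (y, ((cs.drop k).count y : Int)) ∈ (dictD cs k).items := by
      simp only [dictD]
      exact List.mem_map.mpr ⟨y, (PySem.Set.mem_ofList cs y).mpr hy, rfl⟩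
    exact PySem.Dict.getD_of_mem_items (dictD cs k) hm (nodup_keys_dictD cs k) 0
  · rw [PySem.Dict.getD_of_not_contains _ 0 (by
      rw [← Bool.not_eq_true, PySem.Dict.contains_iff_mem_keys, keys_dictD, PySem.Set.mem_ofList]
      exact hy), List.count_eq_zero_of_not_mem (fun hm => hy (List.mem_of_mem_drop hm))]
    simp

lemma counter_eq_dictD (cs : List Char) : PySem.Dict.counter cs = dictD cs 0 := by
  apply PySem.Dict.ext
  rw [PySem.Dict.items_counter, dictD]
  simp

lemma pvFact_sub_one (n : ℕ) : pvFact ((n : Int) - 1) = ((n - 1).factorial : ℕ) := by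
  cases n with
  | zero => decide
  | succ m => rw [show ((m + 1 : ℕ) : Int) - 1 = ((m : ℕ) : Int) by push_cast; ring, pvFact_eq]; simp

lemma sum_count_filter_super (u S : List Char) (p : Char → Bool)
    (hsub : ∀ y ∈ u, y ∈ S) :
    ∑ y ∈ S.toFinset.filter (fun y => p y = true), u.count y = u.countP p := by
  rw [← sum_count_filter u p]
  symm
  refine Finset.sum_subset (fun y hy => ?_) (fun y _ hy => ?_)
  · rcases Finset.mem_filter.mp hy with ⟨h1, h2⟩
    exact Finset.mem_filter.mpr ⟨List.mem_toFinset.mpr (hsub y (List.mem_toFinset.mp h1)), h2⟩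
  · by_cases hmem : y ∈ u
    · by_cases hp : p y = true
      · exact absurd (Finset.mem_filter.mpr ⟨List.mem_toFinset.mpr hmem, hp⟩) hy
      · exact List.count_eq_zero_of_not_mem (fun hm => hp (by
          exact absurd (Finset.mem_filter.mpr ⟨List.mem_toFinset.mpr hmem, by
            exact absurd hp (by simp_all)⟩) hy))
    · exact List.count_eq_zero_of_not_mem hmem

lemma denom_init (cs : List Char) :
    (PySem.Dict.counter cs).values.foldl (fun d v => d * pvFact v) 1 = ((denN cs : ℕ) : Int) := by
  have hv : (PySem.Dict.counter cs).values
      = (PySem.Set.ofList cs).map (fun k => ((cs.count k : ℕ) : Int)) := by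
    simp only [PySem.Dict.values, PySem.Dict.items_counter, List.map_map]
    rfl
  rw [hv]
  have h1 : ∀ (l : List Int), l.foldl (fun d v => d * pvFact v) 1 = (l.map pvFact).prod := by
    intro l
    rw [List.prod_eq_foldl, ← List.foldl_map]
  rw [h1, List.map_map]
  have h2 : ((PySem.Set.ofList cs).map (pvFact ∘ fun k => ((cs.count k : ℕ) : Int)))
      = (PySem.Set.ofList cs).map (fun k => (((cs.count k).factorial : ℕ) : Int)) :=
    List.map_congr_left fun y _ => pvFact_eq (cs.count y)
  rw [h2, show ((PySem.Set.ofList cs).map (fun k => (((cs.count k).factorial : ℕ) : Int)))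
      = ((PySem.Set.ofList cs).map (fun k => (cs.count k).factorial)).map (fun m => ((m : ℕ) : Int)) by
    rw [List.map_map]; rfl,
    ← Nat.cast_list_prod]
  congr 1
  rw [← List.prod_toFinset _ (PySem.Set.nodup_ofList cs)]
  have h3 : (PySem.Set.ofList cs).toFinset = cs.toFinset := by
    ext y; simp [PySem.Set.mem_ofList]
  rw [h3, ← denN_eq_prod]

lemma invB (cs : List Char) (k : ℕ) (hk : k ≤ cs.length) :
    (List.range k).foldl (fun st (j : ℕ) => pvStepB (cs.length : Int) cs st (j : Int))
        (1, ((denN cs : ℕ) : Int), (((cs.length - 1).factorial : ℕ) : Int), dictD cs 0) =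
      (1 + pvRank cs - pvRank (cs.drop k),
       ((denN (cs.drop k) : ℕ) : Int),
       (((cs.length - 1 - k).factorial : ℕ) : Int),
       dictD cs k) := by
  induction k with
  | zero =>
    simp only [List.range_zero, List.foldl_nil, List.drop_zero, Nat.sub_zero]
    refine Prod.ext ?_ rfl
    simp
  | succ k ih =>
    have hk' : k < cs.length := hk
    rw [List.range_succ, List.foldl_append, ih (le_of_lt hk'), List.foldl_cons, List.foldl_nil]
    have hdrop : cs.drop k = cs[k]'hk' :: cs.drop (k + 1) := List.drop_eq_getElem_cons hk'
    set x := cs[k]'hk' with hxdef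
    set t := cs.drop (k + 1) with htdef
    have hxcs : x ∈ cs := List.getElem_mem hk'
    have hxget : (PySem.List.pyGet? cs ((k : ℕ) : Int)).getD ' ' = x := by
      rw [PySem.List.pyGet?_natCast, List.getElem?_eq_getElem hk']; rfl
    simp only [pvStepB, hxget]
    have hgetDx : (dictD cs k).getD x 0 = (((t.count x + 1 : ℕ)) : Int) := by
      rw [getD_dictD, hdrop]; norm_cast; simp
    have hdenu : denN (cs.drop k) = (t.count x + 1) * denN t := by rw [hdrop]; rfl
    have htlen : t.length = cs.length - 1 - k := by
      rw [htdef, List.length_drop]; omega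
    refine Prod.ext ?_ (Prod.ext ?_ (Prod.ext ?_ ?_))
    · -- rank
      simp only
      have hitems : (dictD cs k).items
          = (PySem.Set.ofList cs).map (fun c => (c, (((cs.drop k).count c : ℕ) : Int))) := rfl
      rw [hitems, List.foldl_map,
        PySem.List.foldl_ite_eq_foldl_filter (p := fun c => c < x)
          (f := fun (a : Int) c => a + (((cs.drop k).count c : ℕ) : Int)),
        PySem.List.foldl_add (g := fun c => (((cs.drop k).count c : ℕ) : Int)), zero_add]
      have hsmall : ((List.filter (fun c => decide (c < x)) (PySem.Set.ofList cs)).map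
            (fun c => (((cs.drop k).count c : ℕ) : Int))).sum
          = (((cs.drop k).countP (fun c => decide (c < x)) : ℕ) : Int) := by
        rw [← List.sum_toFinset _ ((PySem.Set.nodup_ofList cs).filter _), ← Nat.cast_sum]
        congr 1
        have hfin : (List.filter (fun c => decide (c < x)) (PySem.Set.ofList cs)).toFinset
            = (PySem.Set.ofList cs).toFinset.filter (fun c => decide (c < x) = true) := by
          ext y; simp [List.mem_filter]
        rw [hfin]
        refine sum_count_filter_super (cs.drop k) _ _ (fun y hy => ?_)
        rw [PySem.Set.mem_ofList]
        exact List.mem_of_mem_drop hy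
      rw [hsmall,
        show ((((cs.drop k).countP (fun c => decide (c < x)) : ℕ)) : Int)
              * (((cs.length - 1 - k).factorial : ℕ) : Int)
            = ((((cs.drop k).countP (fun c => decide (c < x)) * (cs.length - 1 - k).factorial : ℕ)) : Int)
          by push_cast; ring,
        PySem.Int.floordiv_natCast]
      have hpv : pvRank (cs.drop k)
          = ((((cs.drop k).countP (fun c => decide (c < x)) * (cs.length - 1 - k).factorial
              / denN (cs.drop k) : ℕ)) : Int) + pvRank t := by
        rw [hdrop, pvRank, ← hdrop, htlen]
      rw [hpv]
      ring
    · -- denom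
      simp only
      rw [hgetDx, hdenu, PySem.Int.floordiv_natCast, Nat.mul_div_cancel_left _ (Nat.succ_pos _)]
    · -- f
      simp only
      by_cases hcase : k < cs.length - 1
      · rw [if_pos (by push_cast; omega),
          show ((cs.length : ℕ) : Int) - 1 - ((k : ℕ) : Int) = (((cs.length - 1 - k : ℕ)) : Int)
            by push_cast; omega,
          PySem.Int.floordiv_natCast]
        congr 1
        have hm : cs.length - 1 - k = (cs.length - 1 - (k + 1)) + 1 := by omega
        rw [hm, Nat.factorial_succ, Nat.mul_div_cancel_left _ (Nat.succ_pos _)]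
      · rw [if_neg (by push_cast; omega)]
        congr 2
        omega
    · -- counts
      simp only
      apply PySem.Dict.ext
      have hcont : (dictD cs k).contains x = true := by
        rw [PySem.Dict.contains_iff_mem_keys, keys_dictD, PySem.Set.mem_ofList]
        exact hxcs
      rw [PySem.Dict.items_insert_of_contains _ _ hcont]
      have hitems : (dictD cs k).items
          = (PySem.Set.ofList cs).map (fun c => (c, (((cs.drop k).count c : ℕ) : Int))) := rfl
      rw [hitems, List.map_map]
      show _ = (PySem.Set.ofList cs).map (fun c => (c, ((t.count c : ℕ) : Int)))
      refine List.map_congr_left fun c _ => ?_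
      by_cases hcx : c = x
      · subst hcx
        simp only [Function.comp, beq_self_eq_true, if_pos]
        rw [hgetDx]
        refine congrArg (Prod.mk x) ?_
        push_cast
        ring
      · simp only [Function.comp]
        rw [if_neg (by simp [hcx])]
        have hcc : (cs.drop k).count c = t.count c := by
          rw [hdrop]
          have hne : ¬ (x = c) := fun h => hcx h.symm
          simp [hne]
        rw [hcc]

-- ===== VERDICT (by name: the statement is the Claim_ definition above) =====
theorem listPosition_spec : Claim_equal_listPosition := by
  intro word _
  show listPosition word = listPosition_alt word
  have hA := invA word.toList word.toList.length le_rfl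
  rw [List.take_of_length_le (by simp), List.reverse_reverse] at hA
  have hB := invB word.toList word.toList.length le_rfl
  rw [List.drop_length] at hB
  simp only [listPosition, listPosition_alt, PySem.Str.len_eq,
    PySem.Dict.foldl_insert_getD_add_one_eq_counter]
  rw [denom_init]
  simp only [counter_eq_dictD, pvFact_sub_one, PySem.List.pyRange_zero_natCast,
    List.foldl_map, hA, hB, pvRank]
  ring
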